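-- pv_equiv track=rewrite | github.com/Matheuz233/Beecrowd | Paradigmas/1286.py | entregas
-- ===== SOURCE A (Python) =====
-- def entregas(tempos, pizzas, p, idx):
--     if idx == len(tempos):
--         return 0
--
--     tempo_excluido = entregas(tempos, pizzas, p, idx + 1)
--
--     if pizzas[idx] <= p:
--         tempo_incluido = tempos[idx] + \
--             entregas(tempos, pizzas, p - pizzas[idx], idx + 1)
--         return max(tempo_excluido, tempo_incluido)
--
--     return tempo_excluido
-- ===== SOURCE B (Python) =====
-- def entregas(tempos, pizzas, p, idx):
--     # Sparse knapsack DP: maintain a dict mapping spent-capacity -> best total time.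
--     states = {0: 0}
--     for j in range(idx, len(tempos)):
--         w = pizzas[j]
--         t = tempos[j]
--         new = dict(states)
--         for spent, best in states.items():
--             k = spent + w
--             if k <= p:
--                 v = best + t
--                 if k not in new or new[k] < v:
--                     new[k] = v
--         states = new
--     return max(states.values())
-- ===== Notes on version B (the rewrite author's own statement) =====
-- stated objective: alternative
-- what changed: A's exhaustive include/exclude recursion over all subsets is replaced by an iterative sparse knapsack DP that keeps one dict mapping spent capacity to the best achievable delivery time and returns the max of its values (much faster when feasible spent-capacity sums collide, same worst case).
-- outside the precondition, e.g. on entregas([], [8, 3, 2, 0, 9, 8], -11, -1): A returns 0, B raises IndexError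
import Mathlib
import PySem

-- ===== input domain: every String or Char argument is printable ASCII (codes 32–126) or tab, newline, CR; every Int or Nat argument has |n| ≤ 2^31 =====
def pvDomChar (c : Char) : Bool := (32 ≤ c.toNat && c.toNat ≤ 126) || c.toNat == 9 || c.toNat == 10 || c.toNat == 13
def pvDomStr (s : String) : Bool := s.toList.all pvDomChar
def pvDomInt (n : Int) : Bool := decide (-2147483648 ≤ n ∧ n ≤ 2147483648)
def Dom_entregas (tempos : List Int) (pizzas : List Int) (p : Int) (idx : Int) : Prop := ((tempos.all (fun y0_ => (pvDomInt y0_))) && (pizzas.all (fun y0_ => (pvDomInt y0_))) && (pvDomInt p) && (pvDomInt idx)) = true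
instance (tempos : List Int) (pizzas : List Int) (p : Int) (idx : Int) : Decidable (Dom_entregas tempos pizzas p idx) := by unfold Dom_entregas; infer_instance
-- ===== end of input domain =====

-- B replaces A's exhaustive include/exclude recursion by a sparse knapsack DP
-- (one dict: spent capacity ↦ best total time); same return value on Pre_.

-- ===== PORT A =====
-- A's recursion on idx; the Nat fuel ((len - idx).toNat, one unit per recursion level)
-- only makes the recursion structural — under Pre_ the base case 'idx == len(tempos)'
-- is always reached exactly when the fuel runs out, so the fuel branch is never taken.
def entregasGo (tempos : List Int) (pizzas : List Int) (fuel : Nat) (p : Int) (idx : Int) : Int :=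
  if idx = (tempos.length : Int) then 0
  else
    match fuel with
    | 0 => 0
    | f + 1 =>
      let tempoExcluido := entregasGo tempos pizzas f p (idx + 1)
      if PySem.List.pyGetD pizzas idx 0 ≤ p then
        max tempoExcluido
          (PySem.List.pyGetD tempos idx 0 +
            entregasGo tempos pizzas f (p - PySem.List.pyGetD pizzas idx 0) (idx + 1))
      else tempoExcluido

def entregas (tempos : List Int) (pizzas : List Int) (p : Int) (idx : Int) : Int :=
  entregasGo tempos pizzas ((tempos.length : Int) - idx).toNat p idx

-- ===== PORT B =====
-- inner loop of Source B: 'for spent, best in states.items(): …' updating the copy 'new'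
def entregasInner (p : Int) (w : Int) (t : Int) (xs : List (Int × Int))
    (new : PySem.Dict Int Int) : PySem.Dict Int Int :=
  xs.foldl (fun new sb =>
    if sb.1 + w ≤ p then
      if !(new.contains (sb.1 + w)) || new.getD (sb.1 + w) 0 < sb.2 + t then
        new.insert (sb.1 + w) (sb.2 + t)
      else new
    else new) new

def entregas_alt (tempos : List Int) (pizzas : List Int) (p : Int) (idx : Int) : Int :=
  let states :=
    (PySem.List.pyRange idx (tempos.length : Int)).foldl
      (fun states j =>
        entregasInner p (PySem.List.pyGetD pizzas j 0) (PySem.List.pyGetD tempos j 0)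
          states.items states)
      ((PySem.Dict.empty).insert 0 0)
  (PySem.List.max? states.values (fun v => v)).getD 0

-- ===== PRECONDITION & SPEC =====
-- Pre_ excludes exactly the inputs where the Python A does not return normally:
-- idx > len(tempos) (unbounded recursion, RecursionError), pizzas shorter than tempos
-- (IndexError), and idx < -len(tempos) (out-of-range negative index: A raises IndexError
-- there except when every wrapped pizzas[j] exceeds p, so that the tempos[j] access is
-- short-circuited away and A returns — on those inputs B itself raises IndexError on tempos[j]).
def Pre_entregas (tempos : List Int) (pizzas : List Int) (p : Int) (idx : Int) : Prop :=
  idx ≤ (tempos.length : Int) ∧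
    (idx < (tempos.length : Int) →
      ((tempos.length : Int) ≤ (pizzas.length : Int) ∧ -(tempos.length : Int) ≤ idx))
instance (tempos : List Int) (pizzas : List Int) (p : Int) (idx : Int) : Decidable (Pre_entregas tempos pizzas p idx) := by unfold Pre_entregas; infer_instance

def pvWitness_entregas : List Int × List Int × Int × Int := ([3, 5, 4], [2, 4, 1], 5, 0)

def Spec_entregas (tempos : List Int) (pizzas : List Int) (p : Int) (idx : Int) (out : Int) : Prop := out = entregas_alt tempos pizzas p idx
instance (tempos : List Int) (pizzas : List Int) (p : Int) (idx : Int) (out : Int) : Decidable (Spec_entregas tempos pizzas p idx out) := by unfold Spec_entregas; infer_instance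

-- ===== CLAIM (what is proved, stated in full; the proofs are below) =====
def Claim_equal_entregas : Prop := ∀ (tempos : List Int) (pizzas : List Int) (p : Int) (idx : Int), Dom_entregas tempos pizzas p idx → Pre_entregas tempos pizzas p idx → Spec_entregas tempos pizzas p idx (entregas tempos pizzas p idx)

-- ===== LEMMAS AND PROOFS =====

-- running maximum of 'snd + F fst' over an association list, from initial value a
def pvScore (F : Int → Int) (a : Int) (l : List (Int × Int)) : Int :=
  l.foldl (fun acc e => max acc (e.2 + F e.1)) a

theorem pvFoldMax_swap (f : Int × Int → Int) (a b : Int) (l : List (Int × Int)) :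
    l.foldl (fun acc e => max acc (f e)) (max a b)
      = max b (l.foldl (fun acc e => max acc (f e)) a) := by
  induction l generalizing a with
  | nil => simp only [List.foldl_nil]; omega
  | cons e l ih =>
    simp only [List.foldl_cons]
    rw [show max (max a b) (f e) = max (max a (f e)) b by omega, ih]

theorem pvFoldCond_swap (c : Int × Int → Bool) (g : Int × Int → Int) (a b : Int)
    (l : List (Int × Int)) :
    l.foldl (fun acc e => if c e then max acc (g e) else acc) (max a b)
      = max b (l.foldl (fun acc e => if c e then max acc (g e) else acc) a) := by
  induction l generalizing a with
  | nil => simp only [List.foldl_nil]; omega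
  | cons e l ih =>
    simp only [List.foldl_cons]
    by_cases hc : c e
    · simp only [hc, if_true]
      rw [show max (max a b) (g e) = max (max a (g e)) b by omega, ih]
    · simp only [hc]; exact ih a

-- fold fusion: a running-max fold followed by a conditional one over the SAME list
-- equals a single fold of the pointwise join
theorem pvFusion (c : Int × Int → Bool) (g f : Int × Int → Int) (a : Int)
    (l : List (Int × Int)) :
    l.foldl (fun acc e => if c e then max acc (g e) else acc)
        (l.foldl (fun acc e => max acc (f e)) a)
      = l.foldl (fun acc e => max acc (if c e then max (f e) (g e) else f e)) a := by
  induction l generalizing a with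
  | nil => rfl
  | cons e l ih =>
    simp only [List.foldl_cons]
    rw [pvFoldMax_swap f a (f e) l]
    rw [show (if c e then
          max (max (f e) (l.foldl (fun acc e => max acc (f e)) a)) (g e)
        else max (f e) (l.foldl (fun acc e => max acc (f e)) a))
      = max (l.foldl (fun acc e => max acc (f e)) a)
          (if c e then max (f e) (g e) else f e) from by by_cases hc : c e <;> simp [hc] <;> omega]
    rw [pvFoldCond_swap c g _ _ l, ih a,
      pvFoldMax_swap (fun e => if c e then max (f e) (g e) else f e) a _ l]

theorem pvScore_swap (F : Int → Int) (a b : Int) (l : List (Int × Int)) :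
    pvScore F (max a b) l = max b (pvScore F a l) :=
  pvFoldMax_swap (fun e => e.2 + F e.1) a b l

theorem pvScore_init_le (F : Int → Int) (a : Int) (l : List (Int × Int)) :
    a ≤ pvScore F a l := by
  induction l generalizing a with
  | nil => simp [pvScore]
  | cons e l ih =>
    simp only [pvScore, List.foldl_cons] at *
    exact le_trans (le_max_left _ _) (ih _)

theorem pvScore_ge_of_mem (F : Int → Int) (a : Int) (l : List (Int × Int)) (k v : Int)
    (h : (k, v) ∈ l) : v + F k ≤ pvScore F a l := by
  induction l generalizing a with
  | nil => cases h
  | cons e l ih =>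
    simp only [pvScore, List.foldl_cons]
    rcases List.mem_cons.mp h with he | hm
    · subst he
      exact le_trans (le_max_right _ _) (pvScore_init_le F _ l)
    · exact ih _ hm

-- updating the value at a present key k from v0 to a larger v updates the score
theorem pvScore_map_update (F : Int → Int) (a : Int) (l : List (Int × Int)) (k v v0 : Int)
    (h : (k, v0) ∈ l) (hnd : (l.map Prod.fst).Nodup) (hv : v0 ≤ v) :
    pvScore F a (l.map (fun e => if e.1 == k then (k, v) else e))
      = max (pvScore F a l) (v + F k) := by
  induction l generalizing a with
  | nil => cases h
  | cons e l ih =>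
    simp only [List.map_cons, List.nodup_cons] at hnd
    by_cases he : e.1 = k
    · have hek : (e.1 == k) = true := by simp [he]
      have hkl : ∀ e' ∈ l, (e'.1 == k) = true → False := by
        intro e' he' hb
        exact hnd.1 (by rw [← he] at hb; exact (List.mem_map.mpr ⟨e', he', by
          simpa using (beq_iff_eq.mp hb).symm ▸ rfl⟩) )
      have hmap : l.map (fun e => if e.1 == k then (k, v) else e) = l := by
        rw [show l = l.map id by simp]
        rw [List.map_map]
        apply List.map_congr_left
        intro e' he'
        by_cases hb : (e'.1 == k) = true
        · exact absurd hb (fun hb => hkl e' he' hb)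
        · simp at hb ⊢
          intro hq; exact absurd hq hb
      have hev : e = (k, v0) := by
        rcases List.mem_cons.mp h with h1 | h2
        · exact h1.symm
        · exact absurd (hkl (k, v0) h2 (by simp)) (fun q => q)
      subst hev
      simp only [hek, if_true, List.map_cons, hmap, pvScore, List.foldl_cons]
      rw [show max a (v + F k) = max a (v + F k) from rfl]
      have h1 : pvScore F (max a (v + F k)) l = max (v + F k) (pvScore F a l) :=
        pvScore_swap F a (v + F k) l
      have h2 : pvScore F (max a (v0 + F k)) l = max (v0 + F k) (pvScore F a l) :=
        pvScore_swap F a (v0 + F k) l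
      simp only [pvScore] at h1 h2 ⊢
      rw [h1, h2]
      have hfk : v0 + F k ≤ v + F k := by omega
      omega
    · have hek : (e.1 == k) = false := by simp [he]
      have hm : (k, v0) ∈ l := by
        rcases List.mem_cons.mp h with h1 | h2
        · exact absurd (by rw [← h1]) he
        · exact h2
      simp only [List.map_cons, hek, Bool.false_eq_true, if_false, pvScore, List.foldl_cons]
      exact ih _ hm hnd.2

-- the effect of one conditional dict write of Source B's inner loop on the score
theorem pvScore_insertStep (d : PySem.Dict Int Int) (hnd : d.keys.Nodup) (k v : Int)
    (F : Int → Int) (a : Int) :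
    pvScore F a ((if !(d.contains k) || d.getD k 0 < v then d.insert k v else d).items)
      = max (pvScore F a d.items) (v + F k) := by
  by_cases hc : d.contains k
  · have hsome : (d.get? k).isSome := by
      rw [← PySem.Dict.contains_eq_isSome_get? d k]; exact hc
    obtain ⟨v0, hget⟩ := Option.isSome_iff_exists.mp hsome
    have hgd : d.getD k 0 = v0 := PySem.Dict.getD_of_get?_eq_some d 0 hget
    have hmem : (k, v0) ∈ d.items := PySem.Dict.mem_items_of_get?_eq_some d hget
    by_cases hlt : d.getD k 0 < v
    · simp only [hc, hlt, Bool.not_true, Bool.false_or, decide_true, if_true]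
      rw [PySem.Dict.items_insert_of_contains d v hc]
      exact pvScore_map_update F a d.items k v v0 hmem hnd (by omega)
    · simp only [hc, hlt, Bool.not_true, Bool.false_or, decide_false, Bool.false_eq_true, if_false]
      have hle : v + F k ≤ pvScore F a d.items := by
        have := pvScore_ge_of_mem F a d.items k v0 hmem
        have : v ≤ v0 := by omega
        have h2 := pvScore_ge_of_mem F a d.items k v0 hmem
        omega
      omega
  · have hcf : d.contains k = false := by simpa using hc
    simp only [hcf, Bool.not_false, Bool.true_or, if_true]
    rw [PySem.Dict.items_insert_of_not_contains d v hcf]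
    simp only [pvScore, List.foldl_append, List.foldl_cons, List.foldl_nil]

theorem pvInner_nodup (p w t : Int) (xs : List (Int × Int)) (d : PySem.Dict Int Int)
    (h : d.keys.Nodup) : (entregasInner p w t xs d).keys.Nodup := by
  induction xs generalizing d with
  | nil => exact h
  | cons e xs ih =>
    simp only [entregasInner, List.foldl_cons]
    refine ih _ ?_
    split_ifs <;> first | exact PySem.Dict.nodup_keys_insert _ _ _ h | exact h

theorem pvInner_contains (p w t : Int) (xs : List (Int × Int)) (d : PySem.Dict Int Int)
    (h : d.contains 0 = true) : (entregasInner p w t xs d).contains 0 = true := by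
  induction xs generalizing d with
  | nil => exact h
  | cons e xs ih =>
    simp only [entregasInner, List.foldl_cons]
    refine ih _ ?_
    split_ifs <;> first | (rw [PySem.Dict.contains_insert]; simp [h]) | exact h

-- score of the dict after Source B's inner loop, as a conditional fold over the iterated list
theorem pvScore_inner (p w t : Int) (xs : List (Int × Int)) (d : PySem.Dict Int Int)
    (hnd : d.keys.Nodup) (F : Int → Int) (a : Int) :
    pvScore F a (entregasInner p w t xs d).items
      = xs.foldl (fun acc e => if decide (e.1 + w ≤ p) then max acc (e.2 + t + F (e.1 + w)) else acc)
          (pvScore F a d.items) := by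
  induction xs generalizing d with
  | nil => rfl
  | cons e xs ih =>
    simp only [entregasInner, List.foldl_cons] at *
    by_cases hf : e.1 + w ≤ p
    · simp only [hf, if_true, decide_true]
      rw [ih _ (by split_ifs <;> first | exact PySem.Dict.nodup_keys_insert _ _ _ hnd | exact hnd)]
      rw [pvScore_insertStep d hnd (e.1 + w) (e.2 + t) F a]
    · simp only [hf, if_false, decide_false, Bool.false_eq_true]
      exact ih _ hnd

-- contains 0 survives the whole outer loop
theorem pvOuter_contains (pizzas tempos : List Int) (p : Int) (l : List Int)
    (d : PySem.Dict Int Int) (h : d.contains 0 = true) :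
    (l.foldl (fun states j =>
        entregasInner p (PySem.List.pyGetD pizzas j 0) (PySem.List.pyGetD tempos j 0)
          states.items states) d).contains 0 = true := by
  induction l generalizing d with
  | nil => exact h
  | cons j l ih =>
    simp only [List.foldl_cons]
    exact ih _ (pvInner_contains _ _ _ _ _ h)

-- MAIN INVARIANT: the score of the running dict against A's remaining recursion is
-- preserved by the outer loop (A's value appears at stage idx, B's maximum at stage n)
theorem pvOuter (tempos pizzas : List Int) (p : Int) :
    ∀ (k : Nat) (j : Int), j ≤ (tempos.length : Int) → k = ((tempos.length : Int) - j).toNat →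
    ∀ (d : PySem.Dict Int Int) (a : Int), d.keys.Nodup →
    pvScore (fun w => entregasGo tempos pizzas k (p - w) j) a d.items
      = pvScore (fun _ => 0) a
          ((PySem.List.pyRange j (tempos.length : Int)).foldl
            (fun states j' =>
              entregasInner p (PySem.List.pyGetD pizzas j' 0) (PySem.List.pyGetD tempos j' 0)
                states.items states) d).items := by
  intro k
  induction k with
  | zero =>
    intro j hj hk d a hnd
    have hjn : j = (tempos.length : Int) := by omega
    subst hjn
    rw [PySem.List.pyRange_one_eq_nil (le_refl _)]
    simp only [List.foldl_nil]
    simp [pvScore, entregasGo]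
  | succ f ih =>
    intro j hj hk d a hnd
    have hjn : j < (tempos.length : Int) := by omega
    rw [PySem.List.pyRange_one_cons hjn]
    simp only [List.foldl_cons]
    -- expand A's recursion one step on the left
    have hstep : pvScore (fun w => entregasGo tempos pizzas (f + 1) (p - w) j) a d.items
        = d.items.foldl (fun acc e => max acc (e.2 +
            (if decide (e.1 + PySem.List.pyGetD pizzas j 0 ≤ p) then
              max (entregasGo tempos pizzas f (p - e.1) (j + 1))
                  (PySem.List.pyGetD tempos j 0 +
                    entregasGo tempos pizzas f (p - (e.1 + PySem.List.pyGetD pizzas j 0)) (j + 1))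
            else entregasGo tempos pizzas f (p - e.1) (j + 1)))) a := by
      simp only [pvScore]
      apply PySem.List.foldl_congr_mem
      intro acc e _
      congr 1
      have hne : ¬ (j = (tempos.length : Int)) := by omega
      rw [entregasGo]
      simp only [hne, if_false]
      by_cases hc : PySem.List.pyGetD pizzas j 0 ≤ p - e.1
      · have hc' : e.1 + PySem.List.pyGetD pizzas j 0 ≤ p := by omega
        simp only [hc, if_true, hc', decide_true]
        have : p - e.1 - PySem.List.pyGetD pizzas j 0
            = p - (e.1 + PySem.List.pyGetD pizzas j 0) := by ring
        rw [this]
      · have hc' : ¬ (e.1 + PySem.List.pyGetD pizzas j 0 ≤ p) := by omega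
        simp only [hc, if_false, hc', decide_false, Bool.false_eq_true]
    rw [hstep]
    rw [← ih (j + 1) (by omega) (by omega)
        (entregasInner p (PySem.List.pyGetD pizzas j 0) (PySem.List.pyGetD tempos j 0) d.items d)
        a (pvInner_nodup _ _ _ _ _ hnd)]
    rw [pvScore_inner _ _ _ _ _ hnd]
    simp only [pvScore]
    rw [pvFusion (fun e => decide (e.1 + PySem.List.pyGetD pizzas j 0 ≤ p))
        (fun e => e.2 + PySem.List.pyGetD tempos j 0 +
          entregasGo tempos pizzas f (p - (e.1 + PySem.List.pyGetD pizzas j 0)) (j + 1))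
        (fun e => e.2 + entregasGo tempos pizzas f (p - e.1) (j + 1)) a d.items]
    apply PySem.List.foldl_congr_mem
    intro acc e _
    congr 1
    by_cases hc : e.1 + PySem.List.pyGetD pizzas j 0 ≤ p
    · simp only [hc, decide_true, if_true]
      omega
    · simp only [hc, decide_false, Bool.false_eq_true, if_false]

theorem pvScore_zero (a : Int) (l : List (Int × Int)) :
    pvScore (fun _ => 0) a l = (l.map (·.2)).foldl max a := by
  simp [pvScore, List.foldl_map]

-- ===== VERDICT (by name: the statement is the Claim_ definition above) =====
theorem entregas_spec : Claim_equal_entregas := by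
  intro tempos pizzas p idx _ hpre
  unfold Spec_entregas
  set d0 : PySem.Dict Int Int := (PySem.Dict.empty).insert 0 0 with hd0
  have hnd0 : d0.keys.Nodup := by decide
  have hc0 : d0.contains 0 = true := by decide
  have h0items : d0.items = [(0, 0)] := by decide
  set S : PySem.Dict Int Int :=
    (PySem.List.pyRange idx (tempos.length : Int)).foldl
      (fun states j =>
        entregasInner p (PySem.List.pyGetD pizzas j 0) (PySem.List.pyGetD tempos j 0)
          states.items states) d0 with hS
  have hmain : ∀ a : Int, max a (entregas tempos pizzas p idx) = S.values.foldl max a := by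
    intro a
    have h := pvOuter tempos pizzas p ((tempos.length : Int) - idx).toNat idx hpre.1 rfl d0 a hnd0
    rw [h0items] at h
    rw [pvScore_zero] at h
    simp only [pvScore, List.foldl_cons, List.foldl_nil, sub_zero, zero_add] at h
    rw [entregas]
    rw [show S.values = S.items.map (·.2) from rfl]
    exact h
  have hS0 : S.contains 0 = true := pvOuter_contains pizzas tempos p _ d0 hc0
  have hsome : (S.get? 0).isSome := by rw [← PySem.Dict.contains_eq_isSome_get?]; exact hS0
  obtain ⟨v, hget⟩ := Option.isSome_iff_exists.mp hsome
  have hmem : (0, v) ∈ S.items := PySem.Dict.mem_items_of_get?_eq_some S hget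
  have hvne : S.values ≠ [] := by
    intro hnil
    have : S.items = [] := by
      cases hi : S.items with
      | nil => rfl
      | cons x xs =>
        have : S.values = x.2 :: xs.map (·.2) := by
          rw [show S.values = S.items.map (·.2) from rfl, hi]; rfl
        rw [hnil] at this; cases this
    rw [this] at hmem; cases hmem
  obtain ⟨v0, vs, hv⟩ : ∃ v0 vs, S.values = v0 :: vs := by
    cases hvv : S.values with
    | nil => exact absurd hvv hvne
    | cons v0 vs => exact ⟨v0, vs, rfl⟩
  have hAlt : entregas_alt tempos pizzas p idx = vs.foldl max v0 := by
    have hunfold : entregas_alt tempos pizzas p idx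
        = (PySem.List.max? S.values (fun v => v)).getD 0 := rfl
    rw [hunfold, hv, PySem.List.max?_id_cons]
    rfl
  set A := entregas tempos pizzas p idx with hA
  have h1 : max v0 A = vs.foldl max v0 := by
    have := hmain v0
    rw [hv] at this
    simpa using this
  have h2 : A = vs.foldl max (max A v0) := by
    have := hmain A
    rw [hv] at this
    simpa using this
  have h3 : max A v0 ≤ vs.foldl max (max A v0) := (PySem.List.le_foldl_max vs (max A v0)).1
  rw [hAlt]
  omega
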